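-- pv_equiv track=rewrite | github.com/kosuri-indu/HoneyBeeBreeding | bee_breeding.py | length_of_diff
-- ===== SOURCE A (Python) =====
-- def length_of_diff(diff):
--     for i in range(len(diff)):
--         if diff[i] < 0:
--             diff[i] *=-1
--
--     if diff[0]>0 and diff[1]>0:
--         return max(diff)
--     else:
--         return max(diff) - min(diff)
-- ===== SOURCE B (Python) =====
-- def length_of_diff(diff):
--     s = sorted(x if x >= 0 else -x for x in diff)
--     if diff[0] == 0 or diff[1] == 0:
--         return s[-1] - s[0]
--     return s[-1]
-- ===== Notes on version B (the rewrite author's own statement) =====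
-- stated objective: alternative
-- what changed: Replaces A's in-place abs pass plus max()/min() scans with a sort of the absolute values and direct indexing of the sorted list's ends (s[-1], s[0]); the guard is tested on the original elements as ==0 with De Morgan'd short-circuit order, and B does not mutate the argument.
import Mathlib
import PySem

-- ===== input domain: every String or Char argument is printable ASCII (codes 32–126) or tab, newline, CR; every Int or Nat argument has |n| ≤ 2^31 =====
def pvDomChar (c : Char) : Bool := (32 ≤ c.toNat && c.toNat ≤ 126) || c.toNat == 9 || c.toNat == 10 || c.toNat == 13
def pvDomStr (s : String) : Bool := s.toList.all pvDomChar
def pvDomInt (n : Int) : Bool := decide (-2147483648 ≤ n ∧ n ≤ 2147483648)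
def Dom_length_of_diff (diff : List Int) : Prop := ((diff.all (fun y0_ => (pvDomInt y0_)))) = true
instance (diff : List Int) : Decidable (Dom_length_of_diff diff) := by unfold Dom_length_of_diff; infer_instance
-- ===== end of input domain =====

-- B replaces A's in-place abs pass plus max()/min() scans by sorting the absolute values and
-- indexing the sorted list's ends (s[-1], s[0]); the guard tests the original elements for zero.
-- A mutates its argument list in place (abs each element) and B does not: the equivalence proved
-- here is about the RETURN value only.


-- ===== PORT A =====
-- 'for i in range(len(diff)): if diff[i] < 0: diff[i] *= -1'
def pvAbsStep (acc : List Int) (i : Int) : List Int :=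
  match PySem.List.pyGet? acc i with
  | some v => if v < 0 then acc.set i.toNat (v * -1) else acc
  | none => acc

def length_of_diff (diff : List Int) : Int :=
  let d := (PySem.List.pyRange 0 diff.length 1).foldl pvAbsStep diff
  match PySem.List.pyGet? d 0 with
  | none => 0  -- IndexError: outside Pre_
  | some d0 =>
    if d0 > 0 then
      match PySem.List.pyGet? d 1 with
      | none => 0  -- IndexError: outside Pre_
      | some d1 =>
        if d1 > 0 then (PySem.List.max? d (fun y => y)).getD 0
        else (PySem.List.max? d (fun y => y)).getD 0 - (PySem.List.min? d (fun y => y)).getD 0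
    else (PySem.List.max? d (fun y => y)).getD 0 - (PySem.List.min? d (fun y => y)).getD 0

-- ===== PORT B =====
-- s = sorted(x if x >= 0 else -x for x in diff); guard on the ORIGINAL elements; s[-1], s[0]
def length_of_diff_alt (diff : List Int) : Int :=
  let s := PySem.List.sorted (diff.map (fun x => if 0 ≤ x then x else -x)) (fun y => y) false
  match PySem.List.pyGet? diff 0 with
  | none => 0  -- IndexError: outside Pre_
  | some v0 =>
    if v0 = 0 then (PySem.List.pyGet? s (-1)).getD 0 - (PySem.List.pyGet? s 0).getD 0
    else
      match PySem.List.pyGet? diff 1 with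
      | none => 0  -- IndexError: outside Pre_
      | some v1 =>
        if v1 = 0 then (PySem.List.pyGet? s (-1)).getD 0 - (PySem.List.pyGet? s 0).getD 0
        else (PySem.List.pyGet? s (-1)).getD 0

-- ===== PRECONDITION & SPEC =====
-- Pre_ excludes exactly the inputs where Python A raises IndexError: lists of length 0,
-- and singletons whose element is non-zero (there 'diff[0]>0' is true and 'diff[1]' raises);
-- a singleton [0] short-circuits the 'and' and A returns 0, so it stays inside Pre_.
def Pre_length_of_diff (diff : List Int) : Prop :=
  2 ≤ diff.length ∨ (diff.length = 1 ∧ PySem.List.pyGet? diff 0 = some 0)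
instance (diff : List Int) : Decidable (Pre_length_of_diff diff) := by
  unfold Pre_length_of_diff; infer_instance

def pvWitness_length_of_diff : List Int := [3, -4, 2]

def Spec_length_of_diff (diff : List Int) (out : Int) : Prop := out = length_of_diff_alt diff
instance (diff : List Int) (out : Int) : Decidable (Spec_length_of_diff diff out) := by
  unfold Spec_length_of_diff; infer_instance

-- ===== CLAIM (what is proved, stated in full; the proofs are below) =====
def Claim_equal_length_of_diff : Prop := ∀ (diff : List Int), Dom_length_of_diff diff → Pre_length_of_diff diff → Spec_length_of_diff diff (length_of_diff diff)

-- ===== LEMMAS AND PROOFS =====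

-- abs-value as A writes it
def pvF (x : Int) : Int := if x < 0 then x * -1 else x

theorem pvF_eq_altAbs : pvF = (fun x : Int => if 0 ≤ x then x else -x) := by
  funext x; unfold pvF; split_ifs <;> omega

theorem pvTakeSucc (d : List Int) (n : Nat) (h : n < d.length) :
    (d.take (n+1)).map pvF = ((d.take n).map pvF) ++ [pvF d[n]] := by
  rw [List.map_take, List.map_take, List.take_add_one]
  have hx : (d.map pvF)[n]? = some (pvF d[n]) := by
    rw [List.getElem?_map, List.getElem?_eq_getElem h]; rfl
  rw [hx]; rfl

theorem pvAbsStep_inv (d : List Int) (n : Nat) (h : n < d.length) :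
    pvAbsStep (((d.take n).map pvF) ++ d.drop n) (n : Int)
      = ((d.take (n+1)).map pvF) ++ d.drop (n+1) := by
  obtain ⟨v, hv⟩ : ∃ v, d[n] = v := ⟨_, rfl⟩
  have hlenpre : ((d.take n).map pvF).length = n := by
    simp [List.length_take, Nat.min_eq_left (le_of_lt h)]
  have hdrop : d.drop n = v :: d.drop (n+1) := by
    rw [List.drop_eq_getElem_cons h, hv]
  have htake : (d.take (n+1)).map pvF = ((d.take n).map pvF) ++ [pvF v] := by
    rw [pvTakeSucc d n h, hv]
  have hget : PySem.List.pyGet? (((d.take n).map pvF) ++ d.drop n) (n : Int) = some v := by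
    conv_lhs => rw [hdrop]
    have := PySem.List.pyGet?_append_length ((d.take n).map pvF) (d.drop (n+1)) v
    rwa [hlenpre] at this
  unfold pvAbsStep
  rw [hget]
  by_cases hneg : v < 0
  · simp only [hneg, if_pos]
    conv_lhs => rw [hdrop]
    rw [htake]
    have hnat : ((n : Int)).toNat = ((d.take n).map pvF).length := by omega
    rw [hnat, List.set_append_right _ _ (le_refl _)]
    simp [pvF, hneg]
  · simp only [hneg, if_neg, not_false_iff]
    rw [htake, hdrop]
    simp [pvF, hneg]

theorem pvAbsLoop (d : List Int) (n : Nat) (h : n ≤ d.length) :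
    (PySem.List.pyRange 0 (n : Int) 1).foldl pvAbsStep d
      = ((d.take n).map pvF) ++ d.drop n := by
  induction n with
  | zero => simp [PySem.List.pyRange_one_eq_nil]
  | succ k ih =>
    have hk : k < d.length := by omega
    have hrange : PySem.List.pyRange 0 ((k : Int) + 1) 1
        = PySem.List.pyRange 0 (k : Int) 1 ++ [(k : Int)] :=
      PySem.List.pyRange_one_succ_right (by positivity)
    have hc : ((k + 1 : Nat) : Int) = (k : Int) + 1 := by push_cast; ring
    rw [hc, hrange, List.foldl_append, ih (le_of_lt hk)]
    simp only [List.foldl_cons, List.foldl_nil]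
    exact pvAbsStep_inv d k hk

theorem pvGet_neg_one (l : List Int) (h : 1 ≤ l.length) :
    PySem.List.pyGet? l (-1) = l[l.length - 1]? := by
  simp only [PySem.List.pyGet?, PySem.List.pyIdx?]
  rw [if_neg (by omega), if_pos (by omega : -(l.length:Int) ≤ -1)]
  simp

-- the last element of sorted(g) is max(g); the first is min(g)
theorem pvSortedMax (g : List Int) (hne : g ≠ []) :
    (PySem.List.pyGet? (PySem.List.sorted g (fun y => y) false) (-1)).getD 0
      = (PySem.List.max? g (fun y => y)).getD 0 := by
  set s := PySem.List.sorted g (fun y => y) false with hs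
  have hperm : s.Perm g := PySem.List.sorted_perm g _ _
  have hlen : s.length = g.length := hperm.length_eq
  have hglen : 1 ≤ g.length := by cases g <;> simp_all
  have hslen : 1 ≤ s.length := by omega
  obtain ⟨M, hM⟩ : ∃ M, PySem.List.max? g (fun y => y) = some M := by
    cases g with
    | nil => exact absurd rfl hne
    | cons x xs => exact ⟨_, PySem.List.max?_id_cons x xs⟩
  have hMmem : M ∈ g := PySem.List.max?_mem hM
  have hMmax : ∀ y ∈ g, y ≤ M := fun y hy => PySem.List.max?_isMax hM y hy
  have hlt : s.length - 1 < s.length := by omega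
  rw [pvGet_neg_one s hslen, List.getElem?_eq_getElem hlt, hM]
  simp only [Option.getD_some]
  have hLmem : s[s.length - 1] ∈ g := hperm.subset (List.getElem_mem hlt)
  obtain ⟨p, hp, hpv⟩ := List.mem_iff_getElem.mp (hperm.mem_iff.mpr hMmem)
  have hmono : s[p] ≤ s[s.length - 1] :=
    PySem.List.sorted_id_getElem_mono g (p := p) (q := s.length - 1) (by omega) (by rwa [← hs])
  rw [hpv] at hmono
  exact le_antisymm (hMmax _ hLmem) hmono

theorem pvSortedMin (g : List Int) (hne : g ≠ []) :
    (PySem.List.pyGet? (PySem.List.sorted g (fun y => y) false) 0).getD 0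
      = (PySem.List.min? g (fun y => y)).getD 0 := by
  set s := PySem.List.sorted g (fun y => y) false with hs
  have hperm : s.Perm g := PySem.List.sorted_perm g _ _
  have hlen : s.length = g.length := hperm.length_eq
  have hglen : 1 ≤ g.length := by cases g <;> simp_all
  have hslen : 0 < s.length := by omega
  obtain ⟨m, hm⟩ : ∃ m, PySem.List.min? g (fun y => y) = some m := by
    cases g with
    | nil => exact absurd rfl hne
    | cons x xs => exact ⟨_, PySem.List.min?_id_cons x xs⟩
  have hmmem : m ∈ g := PySem.List.min?_mem hm
  have hmmin : ∀ y ∈ g, m ≤ y := fun y hy => PySem.List.min?_isMin hm y hy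
  have h0 : PySem.List.pyGet? s 0 = s[0]? := by
    have : ((0 : Nat) : Int) = (0 : Int) := rfl
    rw [← this, PySem.List.pyGet?_natCast]
  rw [h0, List.getElem?_eq_getElem hslen, hm]
  simp only [Option.getD_some]
  have hHmem : s[0] ∈ g := hperm.subset (List.getElem_mem hslen)
  obtain ⟨p, hp, hpv⟩ := List.mem_iff_getElem.mp (hperm.mem_iff.mpr hmmem)
  have hmono : s[0] ≤ s[p] :=
    PySem.List.sorted_id_getElem_mono g (p := 0) (q := p) (by omega) (by rwa [← hs])
  rw [hpv] at hmono
  exact le_antisymm hmono (hmmin _ hHmem)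

-- ===== VERDICT (by name: the statement is the Claim_ definition above) =====
theorem length_of_diff_spec : Claim_equal_length_of_diff := by
  intro diff _ hpre
  unfold Spec_length_of_diff length_of_diff length_of_diff_alt
  have hA := pvAbsLoop diff diff.length le_rfl
  simp only [List.take_length, List.drop_length, List.append_nil] at hA
  rw [hA, ← pvF_eq_altAbs]
  rcases hpre with h2 | ⟨h1, h0⟩
  · -- length ≥ 2
    obtain ⟨a, b, t, rfl⟩ : ∃ a b t, diff = a :: b :: t := by
      cases diff with
      | nil => simp at h2
      | cons a rest =>
        cases rest with
        | nil => simp at h2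
        | cons b t => exact ⟨a, b, t, rfl⟩
    have hne : (a :: b :: t).map pvF ≠ [] := by simp
    have hmax := pvSortedMax ((a :: b :: t).map pvF) hne
    have hmin := pvSortedMin ((a :: b :: t).map pvF) hne
    have h1get : ∀ (z : Int) (zs : List Int),
        PySem.List.pyGet? (z :: zs) (1 : Int) = zs[0]? := by
      intro z zs
      have : ((1 : Nat) : Int) = (1 : Int) := by norm_num
      rw [← this, PySem.List.pyGet?_natCast]; rfl
    simp only [List.map_cons, PySem.List.pyGet?_zero_cons, h1get, List.getElem?_cons_zero]
    simp only [List.map_cons] at hmax hmin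
    rw [hmax, hmin]
    have hz : pvF 0 = 0 := by decide
    by_cases haz : a = 0
    · subst haz
      simp [hz]
    · have hap : pvF a > 0 := by unfold pvF; split <;> omega
      by_cases hbz : b = 0
      · subst hbz
        simp [haz, hap, hz]
      · have hbp : pvF b > 0 := by unfold pvF; split <;> omega
        simp [haz, hbz, hap, hbp]
  · -- length = 1 with diff[0] = 0, i.e. diff = [0]
    obtain ⟨x, rfl⟩ : ∃ x, diff = [x] := by
      cases diff with
      | nil => simp at h1
      | cons a rest =>
        cases rest with
        | nil => exact ⟨a, rfl⟩
        | cons b t => simp at h1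
    have hx : x = 0 := by
      rw [PySem.List.pyGet?_zero_cons] at h0
      exact Option.some.inj h0
    subst hx
    decide
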